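-- pv_equiv track=rewrite | github.com/Sturmi77/ExifTool | src/web/main.py | _breadcrumb
-- ===== SOURCE A (Python) =====
-- def _breadcrumb(subdir: str) -> list:
--   crumbs = [{"label": "Basis", "path": ""}]
--   parts = [p for p in subdir.split("/") if p]
--   accumulated = ""
--   for part in parts:
--     accumulated = f"{accumulated}/{part}" if accumulated else part
--     crumbs.append({"label": part, "path": accumulated})
--   return crumbs
-- ===== SOURCE B (Python) =====
-- def _breadcrumb(subdir: str) -> list:
--   parts = [p for p in subdir.split("/") if p]
--   return [{"label": "Basis", "path": ""}] + [
--       {"label": part, "path": "/".join(parts[: i + 1])}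
--       for i, part in enumerate(parts)
--   ]
-- ===== Notes on version B (the rewrite author's own statement) =====
-- stated objective: simpler
-- what changed: Drops the running accumulator string and its empty-guard branch: each crumb's path is rebuilt directly by joining the prefix slice parts[:i+1] with the separator, in a single comprehension over enumerate(parts).
import Mathlib
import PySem

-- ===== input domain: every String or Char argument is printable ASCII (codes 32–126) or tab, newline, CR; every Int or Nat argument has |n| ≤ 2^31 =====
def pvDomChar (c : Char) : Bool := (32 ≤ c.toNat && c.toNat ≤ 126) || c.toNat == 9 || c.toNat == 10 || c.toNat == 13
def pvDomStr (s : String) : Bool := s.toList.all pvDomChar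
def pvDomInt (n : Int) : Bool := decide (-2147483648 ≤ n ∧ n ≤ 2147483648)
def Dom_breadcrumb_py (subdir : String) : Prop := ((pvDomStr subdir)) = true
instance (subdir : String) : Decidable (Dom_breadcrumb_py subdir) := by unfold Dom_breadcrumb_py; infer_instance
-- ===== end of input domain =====

-- B rebuilds each crumb's path as '/'.join of the prefix slice parts[:i+1] over enumerate(parts),
-- dropping A's running accumulator string and its empty-guard branch (objective: simpler).


-- ===== PORT A =====
-- literal port of A: fold over the parts carrying (crumbs, accumulated)
def breadcrumb_py (subdir : String) : List (List (String × String)) :=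
  let parts := ((PySem.Str.split? subdir "/").getD []).filter (fun p => p ≠ "")
  (parts.foldl
    (fun (st : List (List (String × String)) × String) part =>
      let accumulated := if st.2 ≠ "" then st.2 ++ "/" ++ part else part
      (st.1 ++ [[("label", part), ("path", accumulated)]], accumulated))
    ([[("label", "Basis"), ("path", "")]], "")).1

-- ===== PORT B =====
-- literal port of B: map over enumerate(parts), path = "/".join(parts[:i+1])
def breadcrumb_py_alt (subdir : String) : List (List (String × String)) :=
  let parts := ((PySem.Str.split? subdir "/").getD []).filter (fun p => p ≠ "")
  [[("label", "Basis"), ("path", "")]] ++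
    (PySem.List.enumerate parts).map (fun ip =>
      [("label", ip.2),
       ("path", PySem.Str.join "/" (PySem.List.slice parts none (some (ip.1 + 1))))])

-- ===== PRECONDITION & SPEC =====
def Spec_breadcrumb_py (subdir : String) (out : List (List (String × String))) : Prop := out = breadcrumb_py_alt subdir
instance (subdir : String) (out : List (List (String × String))) : Decidable (Spec_breadcrumb_py subdir out) := by unfold Spec_breadcrumb_py; infer_instance

-- ===== CLAIM (what is proved, stated in full; the proofs are below) =====
def Claim_equal_breadcrumb_py : Prop := ∀ (subdir : String), Dom_breadcrumb_py subdir → Spec_breadcrumb_py subdir (breadcrumb_py subdir)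

-- ===== LEMMAS AND PROOFS =====

-- canonical form both ports are reduced to: crumbs for `ps`, given the joined prefix-with-slash `a`
def bpCrumbs (a : String) : List String → List (List (String × String))
  | [] => []
  | p :: ps => [("label", p), ("path", a ++ p)] :: bpCrumbs (a ++ p ++ "/") ps

lemma str_append_slash_ne (a p : String) : (a ++ "/" ++ p) ≠ "" := by
  intro h; have := congrArg String.length h
  simp [String.length_append] at this

lemma strJoin_singleton (sep x : String) : PySem.Str.join sep [x] = x := by
  simp [PySem.Str.join, PySem.Chars.join_singleton, String.ofList]

lemma charsJoin_append_singleton (sep : List Char) (l : List (List Char)) :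
    ∀ (q p : List Char),
    PySem.Chars.join sep ((q :: l) ++ [p]) = PySem.Chars.join sep (q :: l) ++ sep ++ p := by
  induction l with
  | nil =>
      intro q p
      simp [PySem.Chars.join_cons_cons, PySem.Chars.join_singleton]
  | cons r rest ih =>
      intro q p
      simp only [List.cons_append, PySem.Chars.join_cons_cons]
      rw [← List.cons_append, ih r p]
      simp [List.append_assoc]

lemma strJoin_append_singleton (pre : List String) (q p : String) :
    PySem.Str.join "/" ((q :: pre) ++ [p]) = PySem.Str.join "/" (q :: pre) ++ "/" ++ p := by
  apply String.ext
  simp only [PySem.Str.toList_join, String.toList_append, List.map_append, List.map_cons,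
    List.map_nil]
  exact charsJoin_append_singleton _ _ _ _

-- A's fold, once the accumulator is nonempty
lemma foldA (ps : List String) : ∀ (crumbs : List (List (String × String))) (acc : String),
    acc ≠ "" →
    (ps.foldl
      (fun (st : List (List (String × String)) × String) part =>
        let accumulated := if st.2 ≠ "" then st.2 ++ "/" ++ part else part
        (st.1 ++ [[("label", part), ("path", accumulated)]], accumulated))
      (crumbs, acc)).1 = crumbs ++ bpCrumbs (acc ++ "/") ps := by
  induction ps with
  | nil => intro crumbs acc _; simp [bpCrumbs]
  | cons p ps ih =>
      intro crumbs acc hacc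
      simp only [List.foldl_cons, if_pos hacc]
      rw [ih _ (acc ++ "/" ++ p) (str_append_slash_ne acc p)]
      simp [bpCrumbs, String.append_assoc, List.append_assoc]

-- B's map, with the consumed prefix `q :: pre` made explicit
lemma mapB (ps : List String) : ∀ (q : String) (pre : List String),
    (PySem.List.enumerate ps ((q :: pre).length : Int)).map (fun ip =>
      [("label", ip.2),
       ("path", PySem.Str.join "/" (PySem.List.slice ((q :: pre) ++ ps) none (some (ip.1 + 1))))]) =
    bpCrumbs (PySem.Str.join "/" (q :: pre) ++ "/") ps := by
  induction ps with
  | nil => intro q pre; simp [PySem.List.enumerate, bpCrumbs]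
  | cons p ps ih =>
      intro q pre
      rw [PySem.List.enumerate_cons]
      simp only [List.map_cons, bpCrumbs]
      congr 1
      · have hb : ((((q :: pre).length : Int)) + 1) = (((q :: pre).length + 1 : Nat) : Int) := by
          push_cast; ring
        rw [hb, PySem.List.slice_to_natCast]
        have ht : List.take ((q :: pre).length + 1) ((q :: pre) ++ p :: ps) = (q :: pre) ++ [p] := by
          simp [List.take_append]
        rw [ht, strJoin_append_singleton]
      · have hlen : (((q :: pre).length : Int)) + 1 = (((q :: (pre ++ [p])).length : Int)) := by
          simp only [List.length_cons, List.length_append, List.length_nil]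
          push_cast; omega
        have hlist : (q :: pre) ++ p :: ps = (q :: (pre ++ [p])) ++ ps := by
          simp
        rw [hlen, hlist, ih q (pre ++ [p])]
        have hj : PySem.Str.join "/" (q :: (pre ++ [p])) = PySem.Str.join "/" (q :: pre) ++ "/" ++ p := by
          rw [← strJoin_append_singleton]; simp
        rw [hj]

lemma both_eq (ps : List String) (hne : ∀ x ∈ ps, x ≠ "") :
    (ps.foldl
      (fun (st : List (List (String × String)) × String) part =>
        let accumulated := if st.2 ≠ "" then st.2 ++ "/" ++ part else part
        (st.1 ++ [[("label", part), ("path", accumulated)]], accumulated))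
      ([[("label", "Basis"), ("path", "")]], "")).1 =
    [[("label", "Basis"), ("path", "")]] ++
      (PySem.List.enumerate ps).map (fun ip =>
        [("label", ip.2),
         ("path", PySem.Str.join "/" (PySem.List.slice ps none (some (ip.1 + 1))))]) := by
  cases ps with
  | nil => simp [PySem.List.enumerate]
  | cons p ps =>
      have hp : p ≠ "" := hne p (by simp)
      simp only [List.foldl_cons, if_neg (by simp : ¬ ("" : String) ≠ "")]
      rw [foldA ps _ p hp, PySem.List.enumerate_cons]
      simp only [List.map_cons]
      have hb : ((0 : Int) + 1) = ((([p] : List String).length : Int)) := by simp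
      have hl : p :: ps = ([p] : List String) ++ ps := by simp
      rw [hb, PySem.List.slice_to_natCast]
      have ht : List.take ([p] : List String).length (p :: ps) = [p] := by simp
      rw [ht, strJoin_singleton]
      conv_rhs => rw [hl]
      rw [mapB ps p [], strJoin_singleton]
      simp

-- ===== VERDICT (by name: the statement is the Claim_ definition above) =====
theorem breadcrumb_py_spec : Claim_equal_breadcrumb_py := by
  intro subdir _
  unfold Spec_breadcrumb_py breadcrumb_py breadcrumb_py_alt
  exact both_eq _ (fun x hx => (List.mem_filter.mp hx).2 |> of_decide_eq_true)
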